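-- pv_equiv track=rewrite | github.com/mhanna3141/Calculator | Clean Space.py | countSigFigs
-- ===== SOURCE A (Python) =====
-- def countSigFigs(number):
--
--     # decimal is present
--     decimalPresent = "." in number
--
--     # this will be true when the loop has gone past the decimal
--     pastedDecimal = False
--
--     # remembers the number of significant figures
--     significantFigures = 0
--
--     # remember if we have iterated passed a non zero
--     passedNonZero = False
--
--     # loop through the number
--     for index in range(len(number)):
--
--         # index of number is a non zero
--         if number[index] in "123456789":
--
--             # we have passed a non zero
--             passedNonZero = True
--
--             # non zeros are always significant
--             significantFigures += 1
--
--         # at decimal point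
--         elif number[index] == ".":
--
--             # loop has pasted the decimal point
--             pastedDecimal = True
--
--         # not pasted the decimal but there is a decimal present this index has to be a 0
--         elif not pastedDecimal and decimalPresent == True and passedNonZero == True:
--
--             # count this number as a significant figure
--             significantFigures += 1
--
--         # have pasted the decimal and passedNonZero
--         elif pastedDecimal and passedNonZero:
--
--             # zero is significant
--             significantFigures += 1
--
--         # sandwiched zero
--         elif nonZeroPresent(number[index + 1:]) and passedNonZero:
--
--             # zero is sandwiched thus significant
--             significantFigures += 1
--
--     # the number of significant figures in number
--     return significantFigures
--
-- def nonZeroPresent(numberString):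
--
--     # loop through each number/character
--     for i in numberString:
--
--         # if i is a non zero
--         if i in "123456789":
--
--             # non zero present
--             return True
--
--     # no non-zeros in numberString
--     return False
-- ===== SOURCE B (Python) =====
-- def countSigFigs(number):
--     first = last = None
--     for i, c in enumerate(number):
--         if c in "123456789":
--             if first is None:
--                 first = i
--             last = i
--     if first is None:
--         return 0
--     if "." in number:
--         return sum(1 for c in number[first:] if c != ".")
--     return last - first + 1
-- ===== Notes on version B (the rewrite author's own statement) =====
-- stated objective: faster
-- what changed: Replaces A's stateful scan that re-searches the remaining string for a nonzero digit at each candidate zero with a single pass recording the first and last nonzero-digit indices, from which the answer is a closed-form count (span length, or non-'.' characters from the first nonzero onward when a decimal point is present).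
import Mathlib
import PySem

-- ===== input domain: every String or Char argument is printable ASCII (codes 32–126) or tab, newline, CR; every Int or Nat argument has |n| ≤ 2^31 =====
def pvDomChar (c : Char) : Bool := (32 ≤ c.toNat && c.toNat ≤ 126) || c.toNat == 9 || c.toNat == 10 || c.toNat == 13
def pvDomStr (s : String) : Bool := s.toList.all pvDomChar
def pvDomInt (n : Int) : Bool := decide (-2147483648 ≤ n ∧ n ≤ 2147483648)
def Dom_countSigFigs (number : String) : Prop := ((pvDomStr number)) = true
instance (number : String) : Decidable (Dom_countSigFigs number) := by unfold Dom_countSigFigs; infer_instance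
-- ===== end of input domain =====

-- B replaces A's per-zero rescans of the remaining string (quadratic) by one pass
-- recording the first and last nonzero-digit positions plus a closed-form count: faster (asymptotic).

-- ===== PORT A =====
-- membership test `c in "123456789"`
def pvNZ (c : Char) : Bool := ("123456789".toList).contains c

-- helper nonZeroPresent, literal: scan, return True at first nonzero
def nonZeroPresent (numberString : List Char) : Bool :=
  match numberString with
  | [] => false
  | i :: rest => if pvNZ i then true else nonZeroPresent rest

-- A's for-loop over the indices of `number`: structural recursion carrying the same
-- state (pastedDecimal, passedNonZero, significantFigures); number[index] is the head
-- and number[index+1:] the tail of the remaining suffix.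
def loopA (cs : List Char) (decimalPresent pastedDecimal passedNonZero : Bool)
    (significantFigures : Int) : Int :=
  match cs with
  | [] => significantFigures
  | c :: rest =>
    if pvNZ c then
      loopA rest decimalPresent pastedDecimal true (significantFigures + 1)
    else if c = '.' then
      loopA rest decimalPresent true passedNonZero significantFigures
    else if !pastedDecimal && decimalPresent && passedNonZero then
      loopA rest decimalPresent pastedDecimal passedNonZero (significantFigures + 1)
    else if pastedDecimal && passedNonZero then
      loopA rest decimalPresent pastedDecimal passedNonZero (significantFigures + 1)
    else if nonZeroPresent rest && passedNonZero then
      loopA rest decimalPresent pastedDecimal passedNonZero (significantFigures + 1)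
    else
      loopA rest decimalPresent pastedDecimal passedNonZero significantFigures

def countSigFigs (number : String) : Int :=
  loopA number.toList (number.toList.contains '.') false false 0

-- ===== PORT B =====
-- one pass recording first/last nonzero-digit indices (Python's enumerate loop)
def scanFL (cs : List Char) (i : Int) (first last : Option Int) : Option Int × Option Int :=
  match cs with
  | [] => (first, last)
  | c :: rest =>
    if pvNZ c then
      scanFL rest (i + 1) (if first.isNone then some i else first) (some i)
    else
      scanFL rest (i + 1) first last

def countSigFigs_alt (number : String) : Int :=
  match scanFL number.toList 0 none none with
  | (none, _) => 0
  | (some f, lastOpt) =>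
    if number.toList.contains '.' then
      ((number.toList.drop f.toNat).filter (fun c => c ≠ '.')).length
    else
      match lastOpt with
      | some l => l - f + 1
      | none => 0

-- ===== PRECONDITION & SPEC =====
def Spec_countSigFigs (number : String) (out : Int) : Prop := out = countSigFigs_alt number
instance (number : String) (out : Int) : Decidable (Spec_countSigFigs number out) := by unfold Spec_countSigFigs; infer_instance

-- ===== CLAIM (what is proved, stated in full; the proofs are below) =====
def Claim_equal_countSigFigs : Prop := ∀ (number : String), Dom_countSigFigs number → Spec_countSigFigs number (countSigFigs number)

-- ===== LEMMAS AND PROOFS =====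

-- proof-side helpers: closed forms for A's loop and B's scan
def lastLen (cs : List Char) : Int :=
  ((cs.reverse.dropWhile (fun c => !pvNZ c)).length : Int)

def takeLen (cs : List Char) : Int :=
  ((cs.takeWhile (fun c => !pvNZ c)).length : Int)

def fA (cs : List Char) : Int :=
  match cs.dropWhile (fun c => !pvNZ c) with
  | [] => 0
  | _ :: t => 1 + ((t.filter (fun c => c ≠ '.')).length : Int)

def gA (cs : List Char) : Int :=
  match cs.dropWhile (fun c => !pvNZ c) with
  | [] => 0
  | _ :: t => 1 + lastLen t

def firstNZ (cs : List Char) (i : Int) : Option Int :=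
  if cs.any pvNZ then some (i + takeLen cs) else none

def lastNZ (cs : List Char) (i : Int) : Option Int :=
  if cs.any pvNZ then some (i + lastLen cs - 1) else none

theorem pvNZ_ne_dot {c : Char} (h : pvNZ c = true) : c ≠ '.' := by
  intro hc; subst hc; simp [pvNZ] at h

theorem nzp_any (cs : List Char) : nonZeroPresent cs = cs.any pvNZ := by
  induction cs with
  | nil => simp [nonZeroPresent]
  | cons c r ih =>
    by_cases h : pvNZ c <;> simp [nonZeroPresent, h, ih]

theorem lastLen_zero {r : List Char} (h : r.any pvNZ = false) : lastLen r = 0 := by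
  have hnil : r.reverse.dropWhile (fun c => !pvNZ c) = [] := by
    rw [List.dropWhile_eq_nil_iff]
    intro x hx
    simp [List.any_eq_false.mp h x (List.mem_reverse.mp hx)]
  simp [lastLen, hnil]

theorem lastLen_cons (c : Char) (r : List Char) :
    lastLen (c :: r) = if r.any pvNZ then lastLen r + 1 else (if pvNZ c then 1 else 0) := by
  unfold lastLen
  rw [List.reverse_cons, List.dropWhile_append]
  by_cases hra : r.any pvNZ
  · have hne : (r.reverse.dropWhile (fun c => !pvNZ c)).isEmpty = false := by
      rw [List.isEmpty_eq_false_iff, Ne, List.dropWhile_eq_nil_iff]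
      intro hall
      obtain ⟨x, hxr, hx⟩ := List.any_eq_true.mp hra
      have := hall x (List.mem_reverse.mpr hxr)
      simp [hx] at this
    simp [hne, hra]
  · have hemp : (r.reverse.dropWhile (fun c => !pvNZ c)).isEmpty = true := by
      rw [List.isEmpty_iff, List.dropWhile_eq_nil_iff]
      intro x hx
      simp [List.any_eq_false.mp (by simpa using hra) x (List.mem_reverse.mp hx)]
    by_cases hc : pvNZ c <;> simp [hemp, hra, List.dropWhile, hc]

theorem lastLen_cons_nz {c : Char} {r : List Char} (h : pvNZ c = true) :
    lastLen (c :: r) = lastLen r + 1 := by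
  rw [lastLen_cons]
  by_cases hra : r.any pvNZ
  · simp [hra]
  · rw [lastLen_zero (by simpa using hra)]
    simp [hra, h]

theorem lastLen_cons_any {c : Char} {r : List Char} (h : r.any pvNZ = true) :
    lastLen (c :: r) = lastLen r + 1 := by
  rw [lastLen_cons]; simp [h]

theorem lastLen_cons_zero {c : Char} {r : List Char} (h1 : pvNZ c = false)
    (h2 : r.any pvNZ = false) : lastLen (c :: r) = 0 := by
  rw [lastLen_cons]; simp [h1, h2]

theorem loopA_dec_pz (cs : List Char) : ∀ (pd : Bool) (sig : Int),
    loopA cs true pd true sig = sig + ((cs.filter (fun c => c ≠ '.')).length : Int) := by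
  induction cs with
  | nil => intro pd sig; simp [loopA]
  | cons c r ih =>
    intro pd sig
    by_cases hnz : pvNZ c
    · have hd : c ≠ '.' := pvNZ_ne_dot hnz
      simp only [loopA, hnz, if_true]
      rw [ih]
      simp [hd]
      ring
    · by_cases hd : c = '.'
      · subst hd
        simp only [loopA, hnz, Bool.false_eq_true, if_false, if_pos rfl]
        rw [ih]
        simp
      · cases pd <;>
          · simp only [loopA, hnz, Bool.false_eq_true, if_false, if_neg hd,
              Bool.not_true, Bool.not_false, Bool.true_and, Bool.false_and,
              Bool.and_true, Bool.and_self, if_true]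
            rw [ih]
            simp [hd]
            ring

theorem loopA_dec (cs : List Char) : ∀ (pd : Bool) (sig : Int),
    loopA cs true pd false sig = sig + fA cs := by
  induction cs with
  | nil => intro pd sig; simp [loopA, fA]
  | cons c r ih =>
    intro pd sig
    by_cases hnz : pvNZ c
    · simp only [loopA, hnz, if_true]
      rw [loopA_dec_pz]
      simp [fA, List.dropWhile, hnz]
      ring
    · by_cases hd : c = '.'
      · subst hd
        simp only [loopA, hnz, Bool.false_eq_true, if_false, if_pos rfl]
        rw [ih]
        simp [fA, List.dropWhile, hnz]
      · simp only [loopA, hnz, Bool.false_eq_true, if_false, if_neg hd,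
          Bool.and_false, Bool.false_and, Bool.and_true]
        rw [ih]
        simp [fA, List.dropWhile, hnz]

theorem loopA_nodec_pz (cs : List Char) (hd : '.' ∉ cs) : ∀ (sig : Int),
    loopA cs false false true sig = sig + lastLen cs := by
  induction cs with
  | nil => intro sig; simp [loopA, lastLen]
  | cons c r ih =>
    intro sig
    have hdc : c ≠ '.' := fun h => hd (h ▸ List.mem_cons_self ..)
    have hdr : '.' ∉ r := fun h => hd (List.mem_cons_of_mem _ h)
    by_cases hnz : pvNZ c
    · simp only [loopA, hnz, if_true]
      rw [ih hdr, lastLen_cons_nz hnz]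
      ring
    · by_cases hra : r.any pvNZ
      · simp only [loopA, hnz, Bool.false_eq_true, if_false, if_neg hdc,
          Bool.and_false, Bool.false_and, Bool.and_true, nzp_any, hra,
          Bool.true_and, Bool.and_self, if_true]
        rw [ih hdr, lastLen_cons_any hra]
        ring
      · simp only [loopA, hnz, Bool.false_eq_true, if_false, if_neg hdc,
          Bool.and_false, Bool.false_and, Bool.and_true, nzp_any,
          Bool.true_and, Bool.and_self,
          (by simpa using hra : r.any pvNZ = false)]
        rw [ih hdr, lastLen_zero (by simpa using hra),
          lastLen_cons_zero (by simpa using hnz) (by simpa using hra)]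
    
theorem loopA_nodec (cs : List Char) (hd : '.' ∉ cs) : ∀ (sig : Int),
    loopA cs false false false sig = sig + gA cs := by
  induction cs with
  | nil => intro sig; simp [loopA, gA]
  | cons c r ih =>
    intro sig
    have hdc : c ≠ '.' := fun h => hd (h ▸ List.mem_cons_self ..)
    have hdr : '.' ∉ r := fun h => hd (List.mem_cons_of_mem _ h)
    by_cases hnz : pvNZ c
    · simp only [loopA, hnz, if_true]
      rw [loopA_nodec_pz r hdr]
      simp [gA, List.dropWhile, hnz]
      ring
    · simp only [loopA, hnz, Bool.false_eq_true, if_false, if_neg hdc,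
        Bool.and_false, Bool.false_and, Bool.and_true, Bool.and_self]
      have hg : gA (c :: r) = gA r := by simp [gA, List.dropWhile, hnz]
      rw [hg]
      exact ih hdr sig

theorem scanFL_eq (cs : List Char) : ∀ (i : Int) (f l : Option Int),
    scanFL cs i f l = (f.or (firstNZ cs i), (lastNZ cs i).or l) := by
  induction cs with
  | nil => intro i f l; simp [scanFL, firstNZ, lastNZ]
  | cons c r ih =>
    intro i f l
    by_cases hnz : pvNZ c
    · simp only [scanFL, hnz, if_true]
      rw [ih, Prod.mk.injEq]
      refine ⟨?_, ?_⟩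
      · cases f with
        | none =>
          simp [firstNZ, hnz, takeLen, List.takeWhile, Option.none_or]
        | some a => simp
      · by_cases hra : r.any pvNZ
        · simp only [lastNZ, hra, List.any_cons, hnz, Bool.true_or, if_true,
            lastLen_cons_nz hnz, Option.some_or]
          congr 1
          ring
        · simp only [lastNZ, hra, List.any_cons, hnz, Bool.true_or, if_true,
            Bool.false_eq_true, if_false, Option.none_or, lastLen_cons_nz hnz,
            lastLen_zero (by simpa using hra)]
          congr 2
          ring
    · simp only [scanFL, hnz, Bool.false_eq_true, if_false]
      rw [ih, Prod.mk.injEq]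
      have hany : (c :: r).any pvNZ = r.any pvNZ := by simp [hnz]
      by_cases hra : r.any pvNZ
      · have htk : takeLen (c :: r) = 1 + takeLen r := by
          simp only [takeLen, List.takeWhile, hnz, Bool.not_false, List.length_cons]
          push_cast
          ring
        refine ⟨?_, ?_⟩
        · simp only [firstNZ, hany, hra, if_true, htk]
          have harith : i + (1 + takeLen r) = i + 1 + takeLen r := by ring
          rw [harith]
        · simp only [lastNZ, hany, hra, if_true, lastLen_cons_any hra]
          have harith : i + (lastLen r + 1) - 1 = i + 1 + lastLen r - 1 := by ring
          rw [harith]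
      · refine ⟨?_, ?_⟩ <;> simp [firstNZ, lastNZ, hany, hra]

theorem fA_eq (cs : List Char) (h : cs.any pvNZ = true) :
    fA cs = (((cs.drop (takeLen cs).toNat).filter (fun c => c ≠ '.')).length : Int) := by
  induction cs with
  | nil => simp at h
  | cons c r ih =>
    by_cases hnz : pvNZ c
    · have hd : c ≠ '.' := pvNZ_ne_dot hnz
      simp [fA, takeLen, List.dropWhile, List.takeWhile, hnz, hd]
      ring
    · have hra : r.any pvNZ = true := by simpa [hnz] using h
      have htk : (takeLen (c :: r)).toNat = (takeLen r).toNat + 1 := by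
        simp [takeLen, List.takeWhile, hnz]
      rw [htk]
      simp only [List.drop_succ_cons]
      rw [← ih hra]
      simp [fA, List.dropWhile, hnz]

theorem gA_eq (cs : List Char) (h : cs.any pvNZ = true) :
    gA cs = lastLen cs - takeLen cs := by
  induction cs with
  | nil => simp at h
  | cons c r ih =>
    by_cases hnz : pvNZ c
    · rw [lastLen_cons_nz hnz]
      simp [gA, List.dropWhile, hnz, takeLen, List.takeWhile]
      ring
    · have hra : r.any pvNZ = true := by simpa [hnz] using h
      have htk : takeLen (c :: r) = 1 + takeLen r := by
        simp only [takeLen, List.takeWhile, hnz, Bool.not_false, List.length_cons]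
        push_cast
        ring
      have hg : gA (c :: r) = gA r := by simp [gA, List.dropWhile, hnz]
      rw [hg, ih hra, lastLen_cons_any hra, htk]
      ring

theorem dropWhile_nil_of_none {cs : List Char} (h : cs.any pvNZ = false) :
    cs.dropWhile (fun c => !pvNZ c) = [] := by
  rw [List.dropWhile_eq_nil_iff]
  intro x hx
  simp [List.any_eq_false.mp h x hx]

-- ===== VERDICT (by name: the statement is the Claim_ definition above) =====
theorem countSigFigs_spec : Claim_equal_countSigFigs := by
  unfold Claim_equal_countSigFigs
  intro number _
  unfold Spec_countSigFigs countSigFigs countSigFigs_alt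
  set cs := number.toList with hcs
  rw [scanFL_eq]
  simp only [Option.none_or, Option.or_none]
  by_cases hany : cs.any pvNZ = true
  · by_cases hdot : cs.contains '.' = true
    · rw [hdot]
      simp only [firstNZ, lastNZ, hany, if_true]
      rw [loopA_dec, fA_eq cs hany]
      norm_num
    · have hdot' : '.' ∉ cs := fun hm => hdot (List.contains_iff_mem.mpr hm)
      rw [Bool.of_not_eq_true hdot]
      simp only [firstNZ, lastNZ, hany, if_true]
      rw [loopA_nodec cs hdot', gA_eq cs hany]
      simp only [Bool.false_eq_true, if_false]
      ring
  · have h0 : cs.dropWhile (fun c => !pvNZ c) = [] :=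
      dropWhile_nil_of_none (by simpa using hany)
    simp only [firstNZ, lastNZ, hany, Bool.false_eq_true, if_false]
    by_cases hdot : cs.contains '.' = true
    · rw [hdot, loopA_dec]
      simp [fA, h0]
    · rw [Bool.of_not_eq_true hdot,
        loopA_nodec cs (fun hm => hdot (List.contains_iff_mem.mpr hm))]
      simp [gA, h0]
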